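-- pv_equiv track=rewrite | github.com/keep-starknet-strange/garaga | src/hints/fq.py | bigint_split
-- ===== SOURCE A (Python) =====
-- def bigint_split(x: int, n_limbs: int, base: int):
--     coeffs = []
--     degree = n_limbs - 1
--     for n in range(degree, 0, -1):
--         q, r = divmod(x, base**n)
--         coeffs.append(q)
--         x = r
--     coeffs.append(x)
--     return coeffs[::-1]
-- ===== SOURCE B (Python) =====
-- def bigint_split(x: int, n_limbs: int, base: int):
--     coeffs = []
--     while n_limbs > 1:
--         x, r = divmod(x, base)
--         coeffs.append(r)
--         n_limbs -= 1
--     return coeffs + [x]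
-- ===== Notes on version B (the rewrite author's own statement) =====
-- stated objective: faster
-- what changed: Instead of a counted for-loop that recomputes base**n and divmods the full number by that big power each round, then reverses the list, B is a while-loop that peels one limb per step with a single divmod(x, base) on an ever-shrinking x, counting n_limbs down and emitting the little-endian digits directly.
-- outside the precondition, e.g. on bigint_split(7, 3, -2): A returns [-1, -2, 1], B returns [-1, 0, 2]
import Mathlib
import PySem

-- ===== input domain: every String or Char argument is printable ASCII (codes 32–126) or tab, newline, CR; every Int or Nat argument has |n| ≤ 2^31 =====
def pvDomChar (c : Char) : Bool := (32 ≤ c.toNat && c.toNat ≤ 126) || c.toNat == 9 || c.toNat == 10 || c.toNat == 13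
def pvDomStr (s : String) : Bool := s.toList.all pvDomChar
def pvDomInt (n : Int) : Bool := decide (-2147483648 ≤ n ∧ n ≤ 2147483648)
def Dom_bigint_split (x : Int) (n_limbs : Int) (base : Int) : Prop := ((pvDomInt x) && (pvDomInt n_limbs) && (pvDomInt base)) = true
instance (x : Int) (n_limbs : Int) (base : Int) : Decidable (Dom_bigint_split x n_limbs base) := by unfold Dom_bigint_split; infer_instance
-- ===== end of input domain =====

-- B replaces A's counted for-loop over recomputed powers base**n (plus a final reversal) by a while-loop peeling one limb per step with a single divmod(x, base); equivalence is about return values.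


-- ===== PORT A =====
def bigint_split (x : Int) (n_limbs : Int) (base : Int) : List Int :=
  let degree := n_limbs - 1
  let s := (PySem.List.pyRange degree 0 (-1)).foldl
    (fun (s : List Int × Int) n =>
      (s.1 ++ [PySem.Int.floordiv s.2 (base ^ n.toNat)], PySem.Int.mod s.2 (base ^ n.toNat)))
    (([] : List Int), x)
  -- coeffs[::-1]; the step is the literal -1 ≠ 0, so slice? is always `some`
  (PySem.List.slice? (s.1 ++ [s.2]) none none (-1)).getD []

-- ===== PORT B =====
-- the `while n_limbs > 1` loop of Source B, transliterated as tail recursion on the countdown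
def bsWhile (x : Int) (n_limbs : Int) (base : Int) (coeffs : List Int) : List Int :=
  if 1 < n_limbs then
    bsWhile (PySem.Int.floordiv x base) (n_limbs - 1) base
      (coeffs ++ [PySem.Int.mod x base])
  else
    coeffs ++ [x]
termination_by n_limbs.toNat
decreasing_by omega

def bigint_split_alt (x : Int) (n_limbs : Int) (base : Int) : List Int :=
  bsWhile x n_limbs base []

-- ===== PRECONDITION & SPEC =====
-- Pre_ excludes base ≤ 0 when n_limbs ≥ 2: base 0 raises ZeroDivisionError in both programs, and for a
-- negative base splitting into "digits" is unspecified — A's chain of divmods by base**n and B's repeated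
-- divmod by base are both defensible and disagree there (floor division does not compose for negative divisors).
def Pre_bigint_split (x : Int) (n_limbs : Int) (base : Int) : Prop := 1 ≤ base ∨ n_limbs ≤ 1
instance (x : Int) (n_limbs : Int) (base : Int) : Decidable (Pre_bigint_split x n_limbs base) := by unfold Pre_bigint_split; infer_instance
def pvWitness_bigint_split : Int × Int × Int := (1234, 3, 10)

def Spec_bigint_split (x : Int) (n_limbs : Int) (base : Int) (out : List Int) : Prop := out = bigint_split_alt x n_limbs base
instance (x : Int) (n_limbs : Int) (base : Int) (out : List Int) : Decidable (Spec_bigint_split x n_limbs base out) := by unfold Spec_bigint_split; infer_instance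

-- ===== CLAIM (what is proved, stated in full; the proofs are below) =====
def Claim_equal_bigint_split : Prop := ∀ (x : Int) (n_limbs : Int) (base : Int), Dom_bigint_split x n_limbs base → Pre_bigint_split x n_limbs base → Spec_bigint_split x n_limbs base (bigint_split x n_limbs base)

-- ===== LEMMAS AND PROOFS =====

-- A's loop, little-endian (already reversed): peel the TOP exponent m, recurse on the remainder.
def Afun (b : Int) : Nat → Int → List Int
  | 0, v => [v]
  | m+1, v => Afun b m (PySem.Int.mod v (b ^ (m+1))) ++ [PySem.Int.floordiv v (b ^ (m+1))]

-- B's loop: peel the BOTTOM limb with one divmod by b.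
def Bfun (b : Int) : Nat → Int → List Int
  | 0, v => [v]
  | m+1, v => PySem.Int.mod v b :: Bfun b m (PySem.Int.floordiv v b)

-- accumulator-prefix law for A's loop
theorem afoldl_acc (base : Int) (l : List Int) (acc : List Int) (v : Int) :
    l.foldl (fun (s : List Int × Int) n =>
        (s.1 ++ [PySem.Int.floordiv s.2 (base ^ n.toNat)], PySem.Int.mod s.2 (base ^ n.toNat))) (acc, v)
    = (acc ++ (l.foldl (fun (s : List Int × Int) n =>
        (s.1 ++ [PySem.Int.floordiv s.2 (base ^ n.toNat)], PySem.Int.mod s.2 (base ^ n.toNat))) ([], v)).1,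
       (l.foldl (fun (s : List Int × Int) n =>
        (s.1 ++ [PySem.Int.floordiv s.2 (base ^ n.toNat)], PySem.Int.mod s.2 (base ^ n.toNat))) ([], v)).2) := by
  induction l generalizing acc v with
  | nil => simp
  | cons a l ih =>
      simp only [List.foldl_cons, List.nil_append]
      rw [ih, ih ([PySem.Int.floordiv v (base ^ a.toNat)]) (PySem.Int.mod v (base ^ a.toNat))]
      simp

theorem afold_eq_Afun (base : Int) (m : Nat) (v : Int) :
    (((PySem.List.pyRange (m : Int) 0 (-1)).foldl (fun (s : List Int × Int) n =>
        (s.1 ++ [PySem.Int.floordiv s.2 (base ^ n.toNat)], PySem.Int.mod s.2 (base ^ n.toNat))) ([], v)).1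
     ++ [((PySem.List.pyRange (m : Int) 0 (-1)).foldl (fun (s : List Int × Int) n =>
        (s.1 ++ [PySem.Int.floordiv s.2 (base ^ n.toNat)], PySem.Int.mod s.2 (base ^ n.toNat))) ([], v)).2]).reverse
    = Afun base m v := by
  induction m generalizing v with
  | zero => rw [PySem.List.pyRange_neg_one_eq_nil (by omega)]; rfl
  | succ m ih =>
      rw [PySem.List.pyRange_neg_one_cons (by exact_mod_cast Nat.succ_pos m),
          show ((m + 1 : Nat) : Int) - 1 = (m : Int) by push_cast; ring]
      simp only [List.foldl_cons, List.nil_append, Int.toNat_natCast]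
      rw [afoldl_acc]
      simp only [List.reverse_append, List.reverse_cons, List.reverse_nil]
      rw [show (Afun base (m + 1) v)
            = Afun base m (PySem.Int.mod v (base ^ (m + 1))) ++ [PySem.Int.floordiv v (base ^ (m + 1))] from rfl,
          ← ih (PySem.Int.mod v (base ^ (m + 1)))]
      simp

theorem bigint_split_eq_Afun (x n_limbs base : Int) :
    bigint_split x n_limbs base = Afun base (n_limbs - 1).toNat x := by
  simp only [bigint_split, PySem.List.slice?_none_none_neg_one, Option.getD_some]
  by_cases h : n_limbs - 1 ≤ 0
  · rw [PySem.List.pyRange_neg_one_eq_nil h, show (n_limbs - 1).toNat = 0 by omega]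
    rfl
  · rw [show n_limbs - 1 = ((n_limbs - 1).toNat : Int) by omega]
    exact afold_eq_Afun base (n_limbs - 1).toNat x

-- B's while loop with m+1 limbs left appends Bfun's digits after the accumulator
theorem bsWhile_eq_Bfun (base : Int) (m : Nat) (x : Int) (acc : List Int) :
    bsWhile x ((m : Int) + 1) base acc = acc ++ Bfun base m x := by
  induction m generalizing x acc with
  | zero => rw [bsWhile]; simp [Bfun]
  | succ m ih =>
      rw [bsWhile, if_pos (by exact_mod_cast by omega : (1:Int) < (m+1:Nat) + 1)]
      rw [show ((m + 1 : Nat) : Int) + 1 - 1 = ((m : Int) + 1) by push_cast; ring, ih]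
      simp [Bfun]

theorem bigint_split_alt_eq_Bfun (x n_limbs base : Int) :
    bigint_split_alt x n_limbs base = Bfun base (n_limbs - 1).toNat x := by
  unfold bigint_split_alt
  by_cases h : n_limbs ≤ 1
  · rw [bsWhile, if_neg (by omega), show (n_limbs - 1).toNat = 0 by omega]
    rfl
  · rw [show n_limbs = ((n_limbs - 1).toNat : Int) + 1 by omega,
        bsWhile_eq_Bfun]
    simp

theorem ediv_pow_succ (b : Int) (hb : 0 < b) (i : Nat) (v : Int) :
    v / b ^ i / b = v / b ^ (i + 1) := by
  rw [pow_succ]; exact Int.ediv_ediv_of_nonneg (pow_nonneg (by omega) i)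

theorem emod_pow_ediv (b : Int) (hb : 0 < b) (i m : Nat) (hi : i ≤ m) (v : Int) :
    v % b ^ (m + 1) / b ^ i = v / b ^ i - b ^ (m + 1 - i) * (v / b ^ (m + 1)) := by
  have h2 : v - b ^ (m + 1) * (v / b ^ (m + 1))
      = v + (-(b ^ (m + 1 - i) * (v / b ^ (m + 1)))) * b ^ i := by
    rw [show b ^ (m + 1) = b ^ (m + 1 - i) * b ^ i by rw [← pow_add]; congr 1; omega]
    ring
  rw [Int.emod_def, h2, Int.add_mul_ediv_right _ _ (ne_of_gt (pow_pos hb i))]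
  ring

theorem Afun_closed (b : Int) (hb : 1 ≤ b) (m : Nat) (v : Int) :
    Afun b m v = (List.range m).map (fun i => v / b ^ i % b) ++ [v / b ^ m] := by
  have hb0 : 0 < b := by omega
  induction m generalizing v with
  | zero => simp [Afun]
  | succ m ih =>
      rw [show Afun b (m + 1) v
            = Afun b m (PySem.Int.mod v (b ^ (m + 1))) ++ [PySem.Int.floordiv v (b ^ (m + 1))] from rfl,
          PySem.Int.mod_eq_emod_of_pos (pow_pos hb0 (m + 1)),
          PySem.Int.floordiv_eq_ediv_of_pos (pow_pos hb0 (m + 1)), ih]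
      rw [List.range_succ, List.map_append]
      simp only [List.map_cons, List.map_nil, List.append_assoc]
      congr 1
      · apply List.map_congr_left
        intro i hi
        have hi' : i < m := List.mem_range.mp hi
        rw [emod_pow_ediv b hb0 i m (by omega) v,
            show v / b ^ i - b ^ (m + 1 - i) * (v / b ^ (m + 1))
              = v / b ^ i + b * (-(b ^ (m - i) * (v / b ^ (m + 1)))) by
              rw [show m + 1 - i = (m - i) + 1 by omega, pow_succ]; ring,
            Int.add_mul_emod_self_left]
      · rw [emod_pow_ediv b hb0 m m (le_refl m) v]
        simp only [Nat.add_sub_cancel_left, List.cons_append, List.nil_append,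
          List.cons.injEq, and_true]
        rw [pow_one, Int.emod_def (v / b ^ m) b, ediv_pow_succ b hb0 m v]

theorem ediv_pow_succ' (b : Int) (hb : 0 < b) (i : Nat) (v : Int) :
    v / b / b ^ i = v / b ^ (i + 1) := by
  rw [pow_succ']; exact Int.ediv_ediv_of_nonneg (by omega)

theorem Bfun_closed (b : Int) (hb : 1 ≤ b) (m : Nat) (v : Int) :
    Bfun b m v = (List.range m).map (fun i => v / b ^ i % b) ++ [v / b ^ m] := by
  have hb0 : 0 < b := by omega
  induction m generalizing v with
  | zero => simp [Bfun]
  | succ m ih =>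
      rw [show Bfun b (m + 1) v
            = PySem.Int.mod v b :: Bfun b m (PySem.Int.floordiv v b) from rfl,
          PySem.Int.mod_eq_emod_of_pos hb0, PySem.Int.floordiv_eq_ediv_of_pos hb0, ih,
          List.range_succ_eq_map]
      simp only [List.map_cons, List.map_map, Function.comp_def, pow_zero, Int.ediv_one,
        List.cons_append, ediv_pow_succ' b hb0]

-- ===== VERDICT (by name: the statement is the Claim_ definition above) =====
theorem bigint_split_spec : Claim_equal_bigint_split := by
  intro x n_limbs base _ hpre
  unfold Spec_bigint_split
  rw [bigint_split_eq_Afun, bigint_split_alt_eq_Bfun]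
  rcases hpre with hb | hn
  · rw [Afun_closed base hb, Bfun_closed base hb]
  · have : (n_limbs - 1).toNat = 0 := by omega
    rw [this]; rfl
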